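-- pv_equiv track=rewrite | github.com/psy777/order-management-system | app.py | _format_timer_label
-- ===== SOURCE A (Python) =====
-- from typing import Any, Dict, List, Optional, Set, Tuple
--
-- def _format_timer_label(seconds: int) -> str:
--     remaining = max(int(seconds), 0)
--     parts: List[str] = []
--     for unit_seconds, suffix in ((86400, 'd'), (3600, 'h'), (60, 'm')):
--         if remaining >= unit_seconds:
--             value, remaining = divmod(remaining, unit_seconds)
--             parts.append(f"{value}{suffix}")
--     if remaining or not parts:
--         parts.append(f"{remaining}s")
--     return ''.join(parts)
-- ===== SOURCE B (Python) =====
-- def _format_timer_label(seconds: int) -> str: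
--     # Recursive, smallest-unit-first: peel off s, m, h by mod-base (60, 60, 24),
--     # recursing on the quotient; parts are assembled back-to-front.
--     def go(n, units):
--         if not units:
--             return []
--         suffix, base = units[0]
--         if base is None:
--             return [f"{n}{suffix}"] if n else []
--         q, r = divmod(n, base)
--         return go(q, units[1:]) + ([f"{r}{suffix}"] if r else [])
--
--     parts = go(max(int(seconds), 0), [('s', 60), ('m', 60), ('h', 24), ('d', None)])
--     return ''.join(parts) if parts else '0s'
-- ===== Notes on version B (the rewrite author's own statement) =====
-- stated objective: alternative
-- what changed: B replaces A's largest-first guarded divmod loop (dividing by cumulative second counts 86400/3600/60 while mutating 'remaining') with a recursion over the unit structure that peels units smallest-first by mod-base (60, 60, 24), recursing on the quotient and assembling the parts back-to-front.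
import Mathlib
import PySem

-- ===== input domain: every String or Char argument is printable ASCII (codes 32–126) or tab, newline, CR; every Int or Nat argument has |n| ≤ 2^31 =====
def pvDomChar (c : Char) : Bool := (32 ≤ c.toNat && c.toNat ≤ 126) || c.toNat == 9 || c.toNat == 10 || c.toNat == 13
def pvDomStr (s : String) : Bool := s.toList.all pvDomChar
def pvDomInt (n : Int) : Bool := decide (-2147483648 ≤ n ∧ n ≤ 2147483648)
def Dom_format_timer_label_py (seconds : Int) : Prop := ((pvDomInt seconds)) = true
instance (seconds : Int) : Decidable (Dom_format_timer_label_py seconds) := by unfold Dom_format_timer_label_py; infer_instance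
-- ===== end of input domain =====

-- B recurses over the unit list smallest-first, peeling s/m/h by mod 60/60/24 and recursing
-- on the quotient (parts assembled back-to-front); A loops largest-first with guarded divmods
-- by 86400/3600/60 mutating 'remaining'. Same label, different decomposition (objective: alternative).

-- ===== PORT A =====
def format_timer_label_py (seconds : Int) : String :=
  let remaining : Int := max seconds 0
  let st := [((86400:Int), "d"), (3600, "h"), (60, "m")].foldl
    (fun (st : Int × List String) p =>
      if st.1 ≥ p.1 then
        (PySem.Int.mod st.1 p.1,
         st.2 ++ [PySem.Int.toStr (PySem.Int.floordiv st.1 p.1) ++ p.2])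
      else st)
    (remaining, [])
  let parts := if st.1 ≠ 0 ∨ st.2 = [] then st.2 ++ [PySem.Int.toStr st.1 ++ "s"] else st.2
  PySem.Str.join "" parts

-- ===== PORT B =====
-- helper 'go' of Source B: recursion on the unit list, smallest unit first
def ftlGo (n : Int) : List (String × Option Int) → List String
  | [] => []
  | (suffix, base) :: rest =>
    match base with
    | none => if n ≠ 0 then [PySem.Int.toStr n ++ suffix] else []
    | some b =>
      ftlGo (PySem.Int.floordiv n b) rest ++
        (if PySem.Int.mod n b ≠ 0 then [PySem.Int.toStr (PySem.Int.mod n b) ++ suffix] else [])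

def format_timer_label_py_alt (seconds : Int) : String :=
  let parts := ftlGo (max seconds 0) [("s", some 60), ("m", some 60), ("h", some 24), ("d", none)]
  if parts ≠ [] then PySem.Str.join "" parts else "0s"

-- ===== PRECONDITION & SPEC =====
def Spec_format_timer_label_py (seconds : Int) (out : String) : Prop := out = format_timer_label_py_alt seconds
instance (seconds : Int) (out : String) : Decidable (Spec_format_timer_label_py seconds out) := by unfold Spec_format_timer_label_py; infer_instance

-- ===== CLAIM (what is proved, stated in full; the proofs are below) =====
def Claim_equal_format_timer_label_py : Prop := ∀ (seconds : Int), Dom_format_timer_label_py seconds → Spec_format_timer_label_py seconds (format_timer_label_py seconds)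

-- ===== LEMMAS AND PROOFS =====
theorem ftl_eq (seconds : Int) :
    format_timer_label_py seconds = format_timer_label_py_alt seconds := by
  unfold format_timer_label_py format_timer_label_py_alt
  have h86400 : (0:Int) < 86400 := by norm_num
  have h3600 : (0:Int) < 3600 := by norm_num
  have h60 : (0:Int) < 60 := by norm_num
  have h24 : (0:Int) < 24 := by norm_num
  simp only [PySem.Int.floordiv_eq_ediv_of_pos h86400, PySem.Int.mod_eq_emod_of_pos h86400,
    PySem.Int.floordiv_eq_ediv_of_pos h3600, PySem.Int.mod_eq_emod_of_pos h3600,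
    PySem.Int.floordiv_eq_ediv_of_pos h60, PySem.Int.mod_eq_emod_of_pos h60,
    PySem.Int.floordiv_eq_ediv_of_pos h24, PySem.Int.mod_eq_emod_of_pos h24,
    ftlGo, List.foldl]
  set t : Int := max seconds 0 with ht
  have ht0 : 0 ≤ t := le_max_right _ _
  -- the two decompositions name the same integers
  have ed : t / 60 / 60 / 24 = t / 86400 := by omega
  have eh : t / 60 / 60 % 24 = t % 86400 / 3600 := by omega
  have em : t / 60 % 60 = t % 3600 / 60 := by omega
  have e1 : t % 86400 % 3600 = t % 3600 := Int.emod_emod_of_dvd t (by norm_num)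
  have e2 : t % 3600 % 60 = t % 60 := Int.emod_emod_of_dvd t (by norm_num)
  have e3 : t % 86400 % 60 = t % 60 := Int.emod_emod_of_dvd t (by norm_num)
  by_cases h1 : (86400:Int) ≤ t
  · have hd : ¬ t / 86400 = 0 := by omega
    by_cases h2 : (3600:Int) ≤ t % 86400
    · have hh : ¬ t % 86400 / 3600 = 0 := by omega
      by_cases h3 : (60:Int) ≤ t % 3600
      · have hm : ¬ t % 3600 / 60 = 0 := by omega
        by_cases h4 : t % 60 = 0 <;>
          simp [h1, h2, h3, h4, hd, hh, hm, e1, e2, ed, eh, em, PySem.Str.join]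
      · have hm : t % 3600 / 60 = 0 := by omega
        have es : t % 60 = t % 3600 := by omega
        by_cases h4 : t % 3600 = 0 <;>
          simp [h1, h2, h3, h4, hd, hh, hm, e1, e2, es, ed, eh, em, PySem.Str.join]
    · have hh : t % 86400 / 3600 = 0 := by omega
      have emm : t % 3600 = t % 86400 := by omega
      by_cases h3 : (60:Int) ≤ t % 86400
      · have hm : ¬ t % 86400 / 60 = 0 := by omega
        by_cases h4 : t % 60 = 0 <;>
          simp [h1, h2, h3, h4, hd, hh, hm, e1, e3, emm, ed, eh, em, PySem.Str.join]
      · have hm : t % 86400 / 60 = 0 := by omega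
        have es : t % 60 = t % 86400 := by omega
        by_cases h4 : t % 86400 = 0 <;>
          simp [h1, h2, h3, h4, hd, hh, hm, e1, e3, emm, es, ed, eh, em, PySem.Str.join]
  · have hd : t / 86400 = 0 := by omega
    have f1 : t % 86400 = t := by omega
    by_cases h2 : (3600:Int) ≤ t
    · have hh : ¬ t / 3600 = 0 := by omega
      by_cases h3 : (60:Int) ≤ t % 3600
      · have hm : ¬ t % 3600 / 60 = 0 := by omega
        by_cases h4 : t % 60 = 0 <;>
          simp [h1, h2, h3, h4, hd, hh, hm, e2, f1, ed, eh, em, PySem.Str.join]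
      · have hm : t % 3600 / 60 = 0 := by omega
        have es : t % 60 = t % 3600 := by omega
        by_cases h4 : t % 3600 = 0 <;>
          simp [h1, h2, h3, h4, hd, hh, hm, e2, f1, es, ed, eh, em, PySem.Str.join]
    · have hh : t / 3600 = 0 := by omega
      have f2 : t % 3600 = t := by omega
      by_cases h3 : (60:Int) ≤ t
      · have hm : ¬ t / 60 = 0 := by omega
        by_cases h4 : t % 60 = 0 <;>
          simp [h1, h2, h3, h4, hd, hh, hm, f1, f2, ed, eh, em, PySem.Str.join]
      · have hm : t / 60 = 0 := by omega
        have es : t % 60 = t := by omega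
        by_cases h4 : t = 0 <;>
          simp [h1, h2, h3, h4, hd, hh, hm, f1, f2, es, ed, eh, em, PySem.Str.join] <;>
          decide

-- ===== VERDICT (by name: the statement is the Claim_ definition above) =====
theorem format_timer_label_py_spec : Claim_equal_format_timer_label_py := by
  intro seconds _
  unfold Spec_format_timer_label_py
  exact ftl_eq seconds
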